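-- pv_equiv track=rewrite | github.com/JohnSunny21/python-daily-coding | FreeCodeCamp/CodingQ/MatrixShift.py | shift_matrix
-- ===== SOURCE A (Python) =====
-- def shift_matrix(matrix, shift):
--
--     rows, cols = len(matrix), len(matrix[0])
--
--     flat = [num for row in matrix for num in row]
--     n = len(flat)
--
--     shift = shift % n
--
--     shifted = flat[-shift:] + flat[:-shift]
--
--     result = []
--
--     for r in range(rows):
--         result.append(shifted[r*cols:(r+1)* cols])
--
--     return result
-- ===== SOURCE B (Python) =====
-- def shift_matrix(matrix, shift):
--     rows, cols = len(matrix), len(matrix[0])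
--     n = sum(len(row) for row in matrix)
--     cut = (n - shift % n) % n
--
--     def cells():
--         # stream the cells starting at flat position `cut`, wrapping once,
--         # without ever materializing a flattened or rotated list
--         skipped = 0
--         for row in matrix:
--             if skipped >= cut:
--                 yield from row
--             elif skipped + len(row) > cut:
--                 yield from row[cut - skipped:]
--             skipped += len(row)
--         need = cut
--         for row in matrix:
--             if need <= 0:
--                 break
--             yield from row[:need]
--             need -= len(row)
--
--     it = cells()
--     return [[x for _, x in zip(range(cols), it)] for _ in range(rows)]
-- ===== Notes on version B (the rewrite author's own statement) =====
-- stated objective: alternative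
-- what changed: B never flattens or rotates a list: it streams the matrix's cells from a wrapping generator started at the cut point (row-level walk with a skipped/need accumulator) and chunks that single shared iterator into fixed-size rows, instead of A's flatten, negative-slice concatenation and re-slicing.
import Mathlib
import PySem

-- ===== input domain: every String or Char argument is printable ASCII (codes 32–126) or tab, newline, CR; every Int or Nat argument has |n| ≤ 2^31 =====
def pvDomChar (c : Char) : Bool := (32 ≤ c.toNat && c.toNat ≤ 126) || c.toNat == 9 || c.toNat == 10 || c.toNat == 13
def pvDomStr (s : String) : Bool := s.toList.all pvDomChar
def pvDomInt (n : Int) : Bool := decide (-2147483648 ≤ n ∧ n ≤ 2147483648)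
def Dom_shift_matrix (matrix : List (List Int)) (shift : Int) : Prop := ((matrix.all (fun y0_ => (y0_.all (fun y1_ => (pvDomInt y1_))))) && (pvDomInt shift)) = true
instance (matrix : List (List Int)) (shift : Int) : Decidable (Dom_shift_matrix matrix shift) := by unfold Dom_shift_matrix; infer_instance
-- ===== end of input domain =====

-- B streams the matrix's cells from a wrapping row-level cursor started at the cut
-- point and chunks that single stream into fixed-size rows; no flat or rotated list.

-- ===== PORT A =====
def shift_matrix (matrix : List (List Int)) (shift : Int) : List (List Int) :=
  let rows : Int := PySem.List.len matrix
  let cols : Int := PySem.List.len (PySem.List.pyGetD matrix 0 [])  -- matrix[0]; in range under Pre_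
  let flat : List Int := matrix.flatMap (fun row => row)
  let n : Int := PySem.List.len flat
  let shift' : Int := PySem.Int.mod shift n                          -- n ≠ 0 under Pre_
  let shifted : List Int :=
    PySem.List.slice flat (some (-shift')) none ++ PySem.List.slice flat none (some (-shift'))
  (PySem.List.pyRange 0 rows 1).foldl
    (fun result r => result ++ [PySem.List.slice shifted (some (r * cols)) (some ((r + 1) * cols))]) []

-- ===== PORT B =====
-- first generator loop: cells at flat position ≥ cut (row-level walk, `skipped` accumulator)
def pvTailCells (cut : Int) : List (List Int) → Int → List Int
  | [], _ => []
  | row :: rest, skipped =>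
      (if cut ≤ skipped then row
       else if cut < skipped + PySem.List.len row then
         PySem.List.slice row (some (cut - skipped)) none
       else []) ++ pvTailCells cut rest (skipped + PySem.List.len row)

-- second generator loop: the first `need` cells (breaks once need ≤ 0)
def pvHeadCells : List (List Int) → Int → List Int
  | [], _ => []
  | row :: rest, need =>
      if need ≤ 0 then []
      else PySem.List.slice row none (some need) ++ pvHeadCells rest (need - PySem.List.len row)

-- the outer list comprehension: `rows` chunks of up to `cols` cells taken off the shared iterator
def pvChunks (cols : Int) : List Int → Nat → List (List Int)
  | _, 0 => []
  | l, Nat.succ k => l.take cols.toNat :: pvChunks cols (l.drop cols.toNat) k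

def shift_matrix_alt (matrix : List (List Int)) (shift : Int) : List (List Int) :=
  let cols : Int := PySem.List.len (PySem.List.pyGetD matrix 0 [])  -- matrix[0]; in range under Pre_
  let n : Int := (matrix.map PySem.List.len).sum                    -- sum(len(row) for row in matrix)
  let cut : Int := PySem.Int.mod (n - PySem.Int.mod shift n) n      -- n ≠ 0 under Pre_
  pvChunks cols (pvTailCells cut matrix 0 ++ pvHeadCells matrix cut) matrix.length

-- ===== PRECONDITION & SPEC =====
-- A raises (IndexError on matrix[0] when matrix = [], else ZeroDivisionError on shift % 0)
-- exactly when the matrix has no elements; B raises there too. No other inputs are excluded.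
def Pre_shift_matrix (matrix : List (List Int)) (shift : Int) : Prop :=
  matrix.flatMap (fun row => row) ≠ []
instance (matrix : List (List Int)) (shift : Int) : Decidable (Pre_shift_matrix matrix shift) := by
  unfold Pre_shift_matrix; infer_instance
def pvWitness_shift_matrix : List (List Int) × Int := ([[1, 2], [3, 4]], 3)

def Spec_shift_matrix (matrix : List (List Int)) (shift : Int) (out : List (List Int)) : Prop := out = shift_matrix_alt matrix shift
instance (matrix : List (List Int)) (shift : Int) (out : List (List Int)) : Decidable (Spec_shift_matrix matrix shift out) := by unfold Spec_shift_matrix; infer_instance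

-- ===== CLAIM (what is proved, stated in full; the proofs are below) =====
def Claim_equal_shift_matrix : Prop := ∀ (matrix : List (List Int)) (shift : Int), Dom_shift_matrix matrix shift → Pre_shift_matrix matrix shift → Spec_shift_matrix matrix shift (shift_matrix matrix shift)

-- ===== LEMMAS AND PROOFS =====

theorem tailCells_eq (cut : Int) (rows : List (List Int)) :
    ∀ skipped : Int, pvTailCells cut rows skipped
      = (rows.flatMap (fun row => row)).drop (cut - skipped).toNat := by
  induction rows with
  | nil => intro skipped; simp [pvTailCells]
  | cons row rest ih =>
    intro skipped
    have hlen : PySem.List.len row = (row.length : Int) := PySem.List.len_eq row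
    simp only [pvTailCells, List.flatMap_cons, ih, List.drop_append]
    congr 1
    · by_cases h1 : cut ≤ skipped
      · simp only [if_pos h1]
        rw [show (cut - skipped).toNat = 0 by omega, List.drop_zero]
      · simp only [if_neg h1]
        by_cases h2 : cut < skipped + PySem.List.len row
        · simp only [if_pos h2]
          rw [PySem.List.slice_from row (by omega)]
        · simp only [if_neg h2]
          rw [eq_comm, List.drop_eq_nil_iff]
          omega
    · congr 1
      omega

theorem headCells_eq (rows : List (List Int)) :
    ∀ need : Int, pvHeadCells rows need
      = (rows.flatMap (fun row => row)).take need.toNat := by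
  induction rows with
  | nil => intro need; simp [pvHeadCells]
  | cons row rest ih =>
    intro need
    have hlen : PySem.List.len row = (row.length : Int) := PySem.List.len_eq row
    simp only [pvHeadCells, List.flatMap_cons, ih, List.take_append]
    by_cases h1 : need ≤ 0
    · simp only [if_pos h1]
      rw [show need.toNat = 0 by omega]
      simp
    · simp only [if_neg h1]
      congr 1
      · rw [PySem.List.slice_to row (by omega)]
      · congr 1
        omega

theorem chunks_eq (c : Int) (k : Nat) :
    ∀ l : List Int, pvChunks c l k
      = (List.range k).map (fun r => (l.drop (r * c.toNat)).take c.toNat) := by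
  induction k with
  | zero => intro l; simp [pvChunks]
  | succ k ih =>
    intro l
    rw [pvChunks, ih, List.range_succ_eq_map, List.map_cons, List.map_map]
    simp only [Nat.zero_mul, List.drop_zero]
    congr 1
    apply List.map_congr_left
    intro r _
    simp only [Function.comp]
    rw [List.drop_drop]
    congr 2
    rw [Nat.succ_eq_add_one]
    ring

theorem rot_slices_eq (flat : List Int) (s : Int) (h0 : 0 ≤ s) (hs : s < (flat.length : Int)) :
    PySem.List.slice flat (some (-s)) none ++ PySem.List.slice flat none (some (-s)) =
      flat.drop ((PySem.Int.mod ((flat.length : Int) - s) (flat.length : Int)).toNat)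
        ++ flat.take ((PySem.Int.mod ((flat.length : Int) - s) (flat.length : Int)).toNat) := by
  have hnpos : (0 : Int) < (flat.length : Int) := lt_of_le_of_lt h0 hs
  rw [PySem.Int.mod_eq_emod_of_pos hnpos]
  rcases eq_or_lt_of_le h0 with h | h
  · rw [← h]
    simp only [neg_zero, sub_zero, Int.emod_self, Int.toNat_zero, List.drop_zero, List.take_zero,
      List.append_nil]
    rw [PySem.List.slice_to flat (le_refl (0 : Int))]
    simp [PySem.List.slice_none_none]
  · have hemod : ((flat.length : Int) - s) % (flat.length : Int) = (flat.length : Int) - s :=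
      Int.emod_eq_of_lt (by omega) (by omega)
    have hk : 0 < s.toNat := by omega
    have hcast : -s = -((s.toNat : Int)) := by omega
    rw [hemod, hcast, PySem.List.slice_from_neg_natCast flat s.toNat hk,
      PySem.List.slice_to_neg_natCast flat s.toNat hk,
      show ((flat.length : Int) - s).toNat = flat.length - s.toNat by omega]

theorem sum_lens_eq (matrix : List (List Int)) :
    (matrix.map PySem.List.len).sum = ((matrix.flatMap (fun row => row)).length : Int) := by
  induction matrix with
  | nil => simp
  | cons row rest ih =>
    simp only [List.map_cons, List.sum_cons, ih, List.flatMap_cons, List.length_append,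
      PySem.List.len_eq]
    push_cast
    ring

-- ===== VERDICT (by name: the statement is the Claim_ definition above) =====
theorem shift_matrix_spec : Claim_equal_shift_matrix := by
  intro matrix shift _ hpre
  unfold Spec_shift_matrix shift_matrix shift_matrix_alt
  simp only []
  set flat := matrix.flatMap (fun row => row) with hflat
  have hnpos : (0 : Int) < (flat.length : Int) := by
    have := List.length_pos_iff.mpr hpre; exact_mod_cast this
  rw [PySem.List.len_eq flat, sum_lens_eq matrix, ← hflat]
  set s := PySem.Int.mod shift (flat.length : Int) with hsdef
  have hs0 : 0 ≤ s := PySem.Int.mod_nonneg _ hnpos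
  have hsn : s < (flat.length : Int) := PySem.Int.mod_lt _ hnpos
  rw [PySem.List.foldl_append_singleton_eq_map, List.nil_append]
  rw [rot_slices_eq flat s hs0 hsn]
  set cut := PySem.Int.mod ((flat.length : Int) - s) (flat.length : Int) with hcut
  rw [tailCells_eq cut matrix 0, headCells_eq matrix cut, ← hflat, sub_zero]
  set L := flat.drop cut.toNat ++ flat.take cut.toNat with hL
  set c : Nat := (PySem.List.pyGetD matrix 0 []).length with hc
  have hcols : PySem.List.len (PySem.List.pyGetD matrix 0 []) = (c : Int) :=
    PySem.List.len_eq _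
  rw [hcols, chunks_eq, Int.toNat_natCast, PySem.List.len_eq matrix, PySem.List.pyRange_one,
    List.map_map]
  apply List.map_congr_left
  intro k _
  simp only [Function.comp]
  have h1 : (0 + (k : Int)) * (c : Int) = ((k * c : Nat) : Int) := by push_cast; ring
  have h2 : (0 + (k : Int) + 1) * (c : Int) = ((k * c + c : Nat) : Int) := by push_cast; ring
  rw [h1, h2, PySem.List.slice_natCast, Nat.add_sub_cancel_left]
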